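-- pv_equiv track=rewrite | github.com/miliar/Code_Jam_Webscraper | solutions_python/solutions_year15_round0_nr1/2497.py | solve
-- ===== SOURCE A (Python) =====
-- import itertools
--
-- def solve(S):
--     for people_added in itertools.count():
--         standing = people_added
--         Sp = S[:]
--         for i,n in enumerate(Sp):
--             if i <= standing:
--                 standing += n
--                 Sp[i] = 0
--             else:
--                 break
--         else:
--             return people_added
-- ===== SOURCE B (Python) =====
-- def solve(S):
--     # one prefix-sum pass: answer = max over i of (i - sum(S[:i])), clipped at 0
--     ans = 0
--     pref = 0
--     for i, n in enumerate(S):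
--         if i - pref > ans:
--             ans = i - pref
--         pref += n
--     return ans
-- ===== Notes on version B (the rewrite author's own statement) =====
-- stated objective: alternative
-- what changed: Replaces the try-every-count-of-extra-people re-simulation loop by a single prefix-sum pass computing max(0, max_i(i - sum(S[:i]))).
import Mathlib
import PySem

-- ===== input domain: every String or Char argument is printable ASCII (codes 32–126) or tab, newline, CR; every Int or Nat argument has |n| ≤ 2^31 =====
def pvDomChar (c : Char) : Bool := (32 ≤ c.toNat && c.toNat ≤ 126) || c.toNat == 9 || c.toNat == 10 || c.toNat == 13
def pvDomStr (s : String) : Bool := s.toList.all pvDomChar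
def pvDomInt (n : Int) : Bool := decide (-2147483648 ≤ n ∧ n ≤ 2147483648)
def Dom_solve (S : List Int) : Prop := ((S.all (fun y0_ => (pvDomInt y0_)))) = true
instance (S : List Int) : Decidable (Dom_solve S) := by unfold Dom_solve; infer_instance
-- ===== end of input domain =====

-- B replaces A's try-each-count re-simulation by a single prefix-sum pass (a different algorithm, same result).

-- ===== PORT A =====
-- inner 'for i,n in enumerate(Sp)' loop: checks i <= standing, accumulates; 'else' branch = completed.
-- (Sp[i] = 0 has no effect on the result and is dropped from the state.)
def simOk : List Int → Int → Int → Bool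
  | [], _, _ => true
  | n :: rest, i, standing => if i ≤ standing then simOk rest (i + 1) (standing + n) else false

-- 'for people_added in itertools.count()' search; fuel only makes the search total
-- (proved sufficient below), the computation is A's: try p = 0, 1, 2, … until simOk.
def solveGo (S : List Int) : Nat → Int → Int
  | 0, p => p
  | fuel + 1, p => if simOk S 0 p then p else solveGo S fuel (p + 1)

def solve (S : List Int) : Int := solveGo S (S.length + (S.map Int.natAbs).sum + 1) 0

-- ===== PORT B =====
-- single pass: ans = max over i of (i - prefix sum before i), starting at 0
def altGo : List Int → Int → Int → Int → Int
  | [], _, _, ans => ans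
  | n :: rest, i, pref, ans => altGo rest (i + 1) (pref + n) (max ans (i - pref))

def solve_alt (S : List Int) : Int := altGo S 0 0 0

-- ===== PRECONDITION & SPEC =====
def Spec_solve (S : List Int) (out : Int) : Prop := out = solve_alt S
instance (S : List Int) (out : Int) : Decidable (Spec_solve S out) := by unfold Spec_solve; infer_instance

-- ===== CLAIM (what is proved, stated in full; the proofs are below) =====
def Claim_equal_solve : Prop := ∀ (S : List Int), Dom_solve S → Spec_solve S (solve S)

-- ===== LEMMAS AND PROOFS =====

-- the simulation with p extra people succeeds iff p dominates B's running maximum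
theorem altGo_le_iff (S : List Int) : ∀ (i pref ans p : Int),
    altGo S i pref ans ≤ p ↔ (ans ≤ p ∧ simOk S i (p + pref) = true) := by
  induction S with
  | nil => intro i pref ans p; simp [altGo, simOk]
  | cons n rest ih =>
    intro i pref ans p
    simp only [altGo, simOk]
    rw [ih]
    by_cases h : i ≤ p + pref
    · simp only [if_pos h]
      constructor
      · rintro ⟨hm, hs⟩
        refine ⟨le_trans (le_max_left _ _) hm, ?_⟩
        have : p + pref + n = p + (pref + n) := by ring
        rwa [this]
      · rintro ⟨ha, hs⟩
        have : p + (pref + n) = p + pref + n := by ring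
        refine ⟨max_le ha (by omega), by rwa [this]⟩
    · simp only [if_neg h]
      constructor
      · rintro ⟨hm, _⟩
        exact absurd (le_trans (le_max_right _ _) hm) (by omega)
      · rintro ⟨_, hs⟩; exact absurd hs (by simp)

-- B's result is bounded by length + sum of absolute values (used only for the fuel)
theorem altGo_bound (S : List Int) : ∀ (i pref ans : Int),
    altGo S i pref ans ≤ max ans (i - pref + ((S.length : Int) + ((S.map Int.natAbs).sum : Int))) := by
  induction S with
  | nil => intro i pref ans; simp [altGo]
  | cons n rest ih =>
    intro i pref ans
    simp only [altGo]
    refine le_trans (ih _ _ _) ?_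
    have h1 : (((n :: rest).length : Nat) : Int) = (rest.length : Int) + 1 := by
      simp [Nat.cast_add]
    have h2 : ((((n :: rest).map Int.natAbs).sum : Nat) : Int)
        = (n.natAbs : Int) + ((rest.map Int.natAbs).sum : Int) := by
      simp [Nat.cast_add]
    refine max_le (max_le (le_max_left _ _) (le_trans ?_ (le_max_right _ _)))
      (le_trans ?_ (le_max_right _ _))
    · rw [h1, h2]; omega
    · rw [h1, h2]; omega

theorem alt_nonneg_simOk (S : List Int) :
    0 ≤ solve_alt S ∧ simOk S 0 (solve_alt S) = true := by
  have h := (altGo_le_iff S 0 0 0 (solve_alt S)).mp (le_refl _)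
  simpa [solve_alt, add_zero] using h

theorem simOk_false_of_lt (S : List Int) (p : Int) (h0 : 0 ≤ p) (hlt : p < solve_alt S) :
    simOk S 0 p = false := by
  by_contra hne
  have htrue : simOk S 0 (p + 0) = true := by
    simpa using eq_true_of_ne_false hne
  have := (altGo_le_iff S 0 0 0 p).mpr ⟨h0, htrue⟩
  exact absurd this (by simp only [solve_alt] at hlt; omega)

theorem solveGo_run (S : List Int) : ∀ (fuel : Nat) (p : Int),
    0 ≤ p → p ≤ solve_alt S → solve_alt S < p + fuel → solveGo S fuel p = solve_alt S := by
  intro fuel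
  induction fuel with
  | zero => intro p _ hle hlt; simp only [Nat.cast_zero, add_zero] at hlt; omega
  | succ k ih =>
    intro p h0 hle hlt
    simp only [solveGo]
    by_cases hs : simOk S 0 p = true
    · simp only [if_pos hs]
      by_contra hne
      have hplt : p < solve_alt S := lt_of_le_of_ne hle hne
      have := simOk_false_of_lt S p h0 hplt
      rw [hs] at this; exact Bool.noConfusion this
    · simp only [if_neg hs]
      have hplt : p < solve_alt S := by
        rcases lt_or_eq_of_le hle with h | h
        · exact h
        · exact absurd (h ▸ (alt_nonneg_simOk S).2) hs
      refine ih (p + 1) (by omega) (by omega) (by push_cast at hlt ⊢; omega)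

-- ===== VERDICT (by name: the statement is the Claim_ definition above) =====
theorem solve_spec : Claim_equal_solve := by
  unfold Claim_equal_solve
  intro S _
  unfold Spec_solve solve
  apply solveGo_run
  · exact le_refl 0
  · exact (alt_nonneg_simOk S).1
  · have hb := altGo_bound S 0 0 0
    have hb2 : altGo S 0 0 0 ≤ (S.length : Int) + ((S.map Int.natAbs).sum : Int) :=
      le_trans hb (by rw [max_le_iff]; constructor <;> omega)
    have hc : ((S.length + (S.map Int.natAbs).sum + 1 : Nat) : Int)
        = (S.length : Int) + ((S.map Int.natAbs).sum : Int) + 1 := by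
      simp [Nat.cast_add]
    simp only [solve_alt]
    rw [hc]
    omega
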